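-- pv_equiv track=rewrite | github.com/JBKing514/AutoEhHunter | Docker/main/vectorIngest/ingest_eh_metadata_to_pg.py | _has_blocked_tag
-- ===== SOURCE A (Python) =====
-- def _has_blocked_tag(tags_raw: list[str], tags_translated: list[str], blocked_tags: set[str]) -> bool:
--     if not blocked_tags:
--         return False
--
--     def _match_list(tags: list[str]) -> bool:
--         for t in tags:
--             s = str(t or "").strip().lower()
--             if not s:
--                 continue
--             if s in blocked_tags:
--                 return True
--             if ":" in s:
--                 _, val = s.split(":", 1)
--                 if val in blocked_tags:
--                     return True
--         return False
--
--     # Match either original tags or translated tags.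
--     if _match_list(tags_raw):
--         return True
--     if _match_list(tags_translated):
--         return True
--     return False
-- ===== SOURCE B (Python) =====
-- def _has_blocked_tag(tags_raw: list[str], tags_translated: list[str], blocked_tags: set[str]) -> bool:
--     # Collect every normalized token, then detect a common element with blocked_tags
--     # by sorting both sides and running a two-pointer merge scan.
--     cand = []
--     for t in list(tags_raw) + list(tags_translated):
--         s = str(t or "").strip().lower()
--         if not s:
--             continue
--         if ":" in s:
--             cand.extend([s, s.split(":", 1)[1]])
--         else:
--             cand.append(s)
--     cand.sort()
--     blk = sorted(blocked_tags)
--     i = j = 0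
--     while i < len(cand) and j < len(blk):
--         if cand[i] == blk[j]:
--             return True
--         if cand[i] < blk[j]:
--             i += 1
--         else:
--             j += 1
--     return False
-- ===== Notes on version B (the rewrite author's own statement) =====
-- stated objective: alternative
-- what changed: Replaced A's nested short-circuit membership scans against the blocked hash set by a sort-based intersection test: collect all normalized tokens into a list, sort it and the sorted blocked list, and detect a common element with a two-pointer merge scan.
import Mathlib
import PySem

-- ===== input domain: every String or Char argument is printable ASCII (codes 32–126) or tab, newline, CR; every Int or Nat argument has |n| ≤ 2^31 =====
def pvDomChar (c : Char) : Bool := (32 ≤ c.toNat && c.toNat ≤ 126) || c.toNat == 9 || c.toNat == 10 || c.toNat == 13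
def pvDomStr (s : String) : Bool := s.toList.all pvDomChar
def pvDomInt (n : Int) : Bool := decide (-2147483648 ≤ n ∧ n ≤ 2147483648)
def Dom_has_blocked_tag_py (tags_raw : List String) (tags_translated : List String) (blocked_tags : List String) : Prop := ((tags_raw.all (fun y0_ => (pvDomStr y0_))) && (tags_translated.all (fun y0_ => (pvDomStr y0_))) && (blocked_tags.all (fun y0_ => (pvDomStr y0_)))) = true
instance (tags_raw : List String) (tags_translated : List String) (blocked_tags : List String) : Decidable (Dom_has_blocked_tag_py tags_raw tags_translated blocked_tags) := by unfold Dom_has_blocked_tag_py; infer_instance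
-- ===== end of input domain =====

-- B replaces A's nested short-circuit membership scans by a different algorithm:
-- collect all normalized tokens into a list, sort it and the blocked list, and
-- detect a common element with a two-pointer merge scan (objective: alternative).


-- ===== PORT A =====
-- inner helper _match_list; `str(t or "")` is `t` for strings (t == "" stays "")
def pvMatchList (blocked : PySem.Set String) : List String → Bool
  | [] => false
  | t :: ts =>
    if PySem.Str.lower (PySem.Str.strip t) == "" then pvMatchList blocked ts
    else if PySem.Set.contains blocked (PySem.Str.lower (PySem.Str.strip t)) then true
    else if PySem.Str.isIn ":" (PySem.Str.lower (PySem.Str.strip t)) then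
      -- _, val = s.split(":", 1)  (":" ∈ s, so the split has exactly two parts)
      match PySem.Str.splitMax? (PySem.Str.lower (PySem.Str.strip t)) ":" 1 with
      | some (_ :: val :: _) =>
        if PySem.Set.contains blocked val then true else pvMatchList blocked ts
      | _ => pvMatchList blocked ts
    else pvMatchList blocked ts

def has_blocked_tag_py (tags_raw : List String) (tags_translated : List String) (blocked_tags : List String) : Bool :=
  if blocked_tags == [] then false
  else if pvMatchList blocked_tags tags_raw then true
  else if pvMatchList blocked_tags tags_translated then true
  else false

-- ===== PORT B =====
-- loop body: append the normalized tag (and, with a ':', also the part after the first ':')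
def pvCollect (acc : List String) (t : String) : List String :=
  if PySem.Str.lower (PySem.Str.strip t) == "" then acc
  else if PySem.Str.isIn ":" (PySem.Str.lower (PySem.Str.strip t)) then
    match PySem.Str.splitMax? (PySem.Str.lower (PySem.Str.strip t)) ":" 1 with
    | some (_ :: val :: _) => acc ++ [PySem.Str.lower (PySem.Str.strip t), val]
    | _ => acc ++ [PySem.Str.lower (PySem.Str.strip t)]
  else acc ++ [PySem.Str.lower (PySem.Str.strip t)]

-- the two-pointer merge scan over the two sorted lists
def pvMerge : List String → List String → Bool
  | [], _ => false
  | _ :: _, [] => false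
  | a :: as, b :: bs =>
    if a == b then true
    else if a < b then pvMerge as (b :: bs)
    else pvMerge (a :: as) bs
termination_by as bs => as.length + bs.length
decreasing_by all_goals simp

def has_blocked_tag_py_alt (tags_raw : List String) (tags_translated : List String) (blocked_tags : List String) : Bool :=
  let cand := (tags_raw ++ tags_translated).foldl pvCollect []
  pvMerge (PySem.List.sorted cand (fun x => x) false)
          (PySem.List.sorted blocked_tags (fun x => x) false)

-- ===== PRECONDITION & SPEC =====
def Spec_has_blocked_tag_py (tags_raw : List String) (tags_translated : List String) (blocked_tags : List String) (out : Bool) : Prop := out = has_blocked_tag_py_alt tags_raw tags_translated blocked_tags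
instance (tags_raw : List String) (tags_translated : List String) (blocked_tags : List String) (out : Bool) : Decidable (Spec_has_blocked_tag_py tags_raw tags_translated blocked_tags out) := by unfold Spec_has_blocked_tag_py; infer_instance

-- ===== CLAIM (what is proved, stated in full; the proofs are below) =====
def Claim_equal_has_blocked_tag_py : Prop := ∀ (tags_raw : List String) (tags_translated : List String) (blocked_tags : List String), Dom_has_blocked_tag_py tags_raw tags_translated blocked_tags → Spec_has_blocked_tag_py tags_raw tags_translated blocked_tags (has_blocked_tag_py tags_raw tags_translated blocked_tags)

-- ===== LEMMAS AND PROOFS =====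

-- the tokens a tag contributes (proof-side characterisation shared by both ports)
def pvToks (t : String) : List String :=
  if PySem.Str.lower (PySem.Str.strip t) == "" then []
  else if PySem.Str.isIn ":" (PySem.Str.lower (PySem.Str.strip t)) then
    match PySem.Str.splitMax? (PySem.Str.lower (PySem.Str.strip t)) ":" 1 with
    | some (_ :: val :: _) => [PySem.Str.lower (PySem.Str.strip t), val]
    | _ => [PySem.Str.lower (PySem.Str.strip t)]
  else [PySem.Str.lower (PySem.Str.strip t)]

-- whether any token of one tag is blocked
def pvHead (blocked : PySem.Set String) (t : String) : Bool :=
  if PySem.Str.lower (PySem.Str.strip t) == "" then false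
  else if PySem.Set.contains blocked (PySem.Str.lower (PySem.Str.strip t)) then true
  else if PySem.Str.isIn ":" (PySem.Str.lower (PySem.Str.strip t)) then
    match PySem.Str.splitMax? (PySem.Str.lower (PySem.Str.strip t)) ":" 1 with
    | some (_ :: val :: _) => PySem.Set.contains blocked val
    | _ => false
  else false

lemma pvToks_any (blocked : PySem.Set String) (t : String) :
    (pvToks t).any (PySem.Set.contains blocked) = pvHead blocked t := by
  simp only [pvToks, pvHead]
  generalize PySem.Str.lower (PySem.Str.strip t) = s
  by_cases h1 : s == ""
  · simp [h1]
  · rw [if_neg h1, if_neg h1]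
    cases hc : PySem.Set.contains blocked s with
    | true =>
      have hm : s ∈ blocked := (PySem.Set.contains_iff _ _).1 hc
      by_cases h2 : PySem.Str.isIn ":" s = true
      · rw [if_pos h2, if_pos h2]
        rcases PySem.Str.splitMax? s ":" 1 with _ | ⟨_ | ⟨a, _ | ⟨v, l⟩⟩⟩ <;> simp [hm]
      · rw [if_neg h2, if_neg h2]; simp [hm]
    | false =>
      have hm : s ∉ blocked := fun h => by simp at hc; exact hc h
      by_cases h2 : PySem.Str.isIn ":" s = true
      · rw [if_pos h2, if_pos h2]
        rcases PySem.Str.splitMax? s ":" 1 with _ | ⟨_ | ⟨a, _ | ⟨v, l⟩⟩⟩ <;>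
          [simp [hm]; simp [hm]; simp [hm]; skip]
        cases hv : PySem.Set.contains blocked v with
        | true =>
          have hmv : v ∈ blocked := (PySem.Set.contains_iff _ _).1 hv
          simp [hm, hmv]
        | false =>
          have hmv : v ∉ blocked := fun h => by simp at hv; exact hv h
          simp [hm, hmv]
      · rw [if_neg h2, if_neg h2]; simp [hm]

lemma pvMatchList_eq_any (blocked : PySem.Set String) (ts : List String) :
    pvMatchList blocked ts = ts.any (fun t => (pvToks t).any (PySem.Set.contains blocked)) := by
  induction ts with
  | nil => rfl
  | cons t ts ih =>
    rw [List.any_cons, pvToks_any, ← ih]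
    simp only [pvMatchList, pvHead]
    generalize PySem.Str.lower (PySem.Str.strip t) = s
    generalize pvMatchList blocked ts = b
    by_cases h1 : s == ""
    · simp [h1]
    · rw [if_neg h1, if_neg h1]
      cases hc : PySem.Set.contains blocked s with
      | true => simp
      | false =>
        by_cases h2 : PySem.Str.isIn ":" s = true
        · rw [if_pos h2, if_pos h2]
          rcases PySem.Str.splitMax? s ":" 1 with _ | ⟨_ | ⟨a, _ | ⟨v, l⟩⟩⟩ <;>
            [simp; simp; simp; cases hv : PySem.Set.contains blocked v <;> simp]
        · rw [if_neg h2, if_neg h2]; simp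

lemma pvCollect_eq (acc : List String) (t : String) : pvCollect acc t = acc ++ pvToks t := by
  simp only [pvCollect, pvToks]
  generalize PySem.Str.lower (PySem.Str.strip t) = s
  by_cases h1 : s == ""
  · simp [h1]
  · rw [if_neg h1, if_neg h1]
    by_cases h2 : PySem.Str.isIn ":" s = true
    · rw [if_pos h2, if_pos h2]
      rcases PySem.Str.splitMax? s ":" 1 with _ | ⟨_ | ⟨a, _ | ⟨v, l⟩⟩⟩ <;> rfl
    · rw [if_neg h2, if_neg h2]

lemma foldl_pvCollect (ts : List String) (acc : List String) :
    ts.foldl pvCollect acc = acc ++ ts.flatMap pvToks := by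
  induction ts generalizing acc with
  | nil => simp
  | cons t ts ih => simp [pvCollect_eq, ih]

-- the merge scan on two ≤-sorted lists decides whether they share an element
lemma pvMerge_iff : ∀ (as bs : List String), as.Pairwise (· ≤ ·) → bs.Pairwise (· ≤ ·) →
    (pvMerge as bs = true ↔ ∃ x, x ∈ as ∧ x ∈ bs) := by
  intro as bs ha hb
  revert ha hb
  induction as, bs using pvMerge.induct with
  | case1 bs => simp [pvMerge]
  | case2 a as => simp [pvMerge]
  | case3 a as b bs heq =>
    intro _ _
    have hab : a = b := by simpa using heq
    subst hab
    rw [pvMerge, if_pos heq]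
    simp only [true_iff]
    exact ⟨a, by simp, by simp⟩
  | case4 a as b bs hne hlt ih =>
    intro ha hb
    rw [show pvMerge (a :: as) (b :: bs) = pvMerge as (b :: bs) by
      rw [pvMerge]; simp [hne, hlt]]
    rw [ih ha.tail hb]
    constructor
    · rintro ⟨x, hx1, hx2⟩; exact ⟨x, List.mem_cons_of_mem _ hx1, hx2⟩
    · rintro ⟨x, hx1, hx2⟩
      have hbx : b ≤ x := by
        rcases List.mem_cons.1 hx2 with rfl | h
        · exact le_refl x
        · exact (List.pairwise_cons.1 hb).1 x h
      rcases List.mem_cons.1 hx1 with rfl | h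
      · exact absurd (lt_of_lt_of_le hlt hbx) (lt_irrefl x)
      · exact ⟨x, h, hx2⟩
  | case5 a as b bs hne hnlt ih =>
    intro ha hb
    rw [show pvMerge (a :: as) (b :: bs) = pvMerge (a :: as) bs by
      rw [pvMerge]; simp [hne, hnlt]]
    rw [ih ha hb.tail]
    have hba : b < a := by
      rcases lt_trichotomy a b with h | h | h
      · exact absurd h hnlt
      · exact absurd h (by simpa using hne)
      · exact h
    constructor
    · rintro ⟨x, hx1, hx2⟩; exact ⟨x, hx1, List.mem_cons_of_mem _ hx2⟩
    · rintro ⟨x, hx1, hx2⟩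
      have hax : a ≤ x := by
        rcases List.mem_cons.1 hx1 with rfl | h
        · exact le_refl x
        · exact (List.pairwise_cons.1 ha).1 x h
      rcases List.mem_cons.1 hx2 with rfl | h
      · exact absurd (lt_of_lt_of_le hba hax) (lt_irrefl x)
      · exact ⟨x, hx1, h⟩

-- ===== VERDICT (by name: the statement is the Claim_ definition above) =====
theorem has_blocked_tag_py_spec : Claim_equal_has_blocked_tag_py := by
  intro raw trans blocked _
  unfold Spec_has_blocked_tag_py
  have hA : has_blocked_tag_py raw trans blocked
      = (raw ++ trans).any (fun t => (pvToks t).any (PySem.Set.contains blocked)) := by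
    unfold has_blocked_tag_py
    by_cases hb : blocked = []
    · subst hb; simp [PySem.Set.contains]
    · rw [pvMatchList_eq_any, pvMatchList_eq_any, List.any_append]
      simp only [beq_iff_eq, if_neg hb]
      cases hr : raw.any (fun t => (pvToks t).any (PySem.Set.contains blocked)) <;>
        cases ht : trans.any (fun t => (pvToks t).any (PySem.Set.contains blocked)) <;> simp
  rw [hA]
  unfold has_blocked_tag_py_alt
  rw [foldl_pvCollect, List.nil_append]
  rw [Bool.eq_iff_iff, List.any_eq_true,
    pvMerge_iff _ _ (PySem.List.sorted_pairwise _ _) (PySem.List.sorted_pairwise _ _)]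
  constructor
  · rintro ⟨t, ht, hx⟩
    rcases List.any_eq_true.1 hx with ⟨x, hxt, hxc⟩
    exact ⟨x, (PySem.List.mem_sorted _ _ _ _).2 (List.mem_flatMap.2 ⟨t, ht, hxt⟩),
      (PySem.List.mem_sorted _ _ _ _).2 ((PySem.Set.contains_iff _ _).1 hxc)⟩
  · rintro ⟨x, hx1, hx2⟩
    rcases List.mem_flatMap.1 ((PySem.List.mem_sorted _ _ _ _).1 hx1) with ⟨t, ht, hxt⟩
    exact ⟨t, ht, List.any_eq_true.2 ⟨x, hxt,
      (PySem.Set.contains_iff _ _).2 ((PySem.List.mem_sorted _ _ _ _).1 hx2)⟩⟩
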